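-- pv_equiv track=rewrite | github.com/Arthur-Milchior/anki | pylib/anki/utils.py | _incGuid
-- ===== SOURCE A (Python) =====
-- import string
--
-- _base91_extra_chars = "!#$%&()*+,-./:;<=>?@[]^_`{|}~"
--
-- def _incGuid(guid) -> str:
--     table = string.ascii_letters + string.digits + _base91_extra_chars
--     idx = table.index(guid[0])
--     if idx + 1 == len(table):
--         # overflow
--         guid = table[0] + _incGuid(guid[1:])
--     else:
--         guid = table[idx + 1] + guid[1:]
--     return guid
-- ===== SOURCE B (Python) =====
-- import string
--
-- _base91_extra_chars = "!#$%&()*+,-./:;<=>?@[]^_`{|}~"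
--
-- def _incGuid(guid) -> str:
--     table = string.ascii_letters + string.digits + _base91_extra_chars
--     last = table[-1]
--     n = 0
--     while guid[n] == last:
--         n += 1
--     return table[0] * n + table[table.index(guid[n]) + 1] + guid[n + 1:]
-- ===== Notes on version B (the rewrite author's own statement) =====
-- stated objective: simpler
-- what changed: Replaces the recursive carry (rebuilding the string at every recursion level) by a single scan that counts the leading run of overflow chars and builds the result once with a repeat, one increment and one slice.
import Mathlib
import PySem

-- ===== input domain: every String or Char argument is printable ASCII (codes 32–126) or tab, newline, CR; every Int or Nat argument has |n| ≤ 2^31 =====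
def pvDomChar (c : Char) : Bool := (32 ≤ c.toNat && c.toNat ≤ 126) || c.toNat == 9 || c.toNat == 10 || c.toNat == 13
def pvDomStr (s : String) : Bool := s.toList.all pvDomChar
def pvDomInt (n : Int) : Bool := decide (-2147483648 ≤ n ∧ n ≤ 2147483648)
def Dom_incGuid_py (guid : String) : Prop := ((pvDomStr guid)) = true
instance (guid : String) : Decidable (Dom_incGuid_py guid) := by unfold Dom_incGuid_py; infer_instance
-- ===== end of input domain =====

-- B replaces A's recursive carry by one scan counting the leading overflow run and a single
-- concatenation (objective: simpler). Return-value equivalence only; neither mutates its input.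

-- the base-91 table (string.ascii_letters + string.digits + _base91_extra_chars)
def pvTable : List Char :=
  "abcdefghijklmnopqrstuvwxyzABCDEFGHIJKLMNOPQRSTUVWXYZ0123456789!#$%&()*+,-./:;<=>?@[]^_`{|}~".toList

-- ===== PORT A =====
-- A's recursion over the string; guid[0] on "" and a char outside the table raise in Python
-- (excluded by Pre_), here the defaults are never reached inside Pre_.
def incGuidA : List Char → List Char
  | [] => []          -- Python: guid[0] raises IndexError (outside Pre_)
  | c :: rest =>
    let idx := (PySem.List.index? pvTable c).getD 0   -- ValueError when c ∉ table (outside Pre_)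
    if idx + 1 = pvTable.length then
      pvTable.headD ' ' :: incGuidA rest
    else
      pvTable.getD (idx + 1) ' ' :: rest

def incGuid_py (guid : String) : String := String.ofList (incGuidA guid.toList)

-- ===== PORT B =====
-- the while loop counts the leading run of the last table char '~'
def incGuid_py_alt (guid : String) : String :=
  let l := guid.toList
  let n := (l.takeWhile (fun c => c = '~')).length
  String.ofList (List.replicate n (pvTable.headD ' ')
    ++ pvTable.getD ((PySem.List.index? pvTable (l.getD n ' ')).getD 0 + 1) ' '
    :: l.drop (n + 1))

-- ===== PRECONDITION & SPEC =====
-- Pre_ excludes exactly the inputs where Python A raises: the leading run of '~' must be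
-- followed by a character of the table (empty / all-'~' guids raise IndexError, a first
-- non-'~' char outside the table raises ValueError); ' ' is not in the table, so headD ' '
-- being a member forces the remainder to be nonempty.
def Pre_incGuid_py (guid : String) : Prop :=
  (guid.toList.dropWhile (fun c => c = '~')).headD ' ' ∈ pvTable
instance (guid : String) : Decidable (Pre_incGuid_py guid) := by unfold Pre_incGuid_py; infer_instance

def pvWitness_incGuid_py : String := "a~b"

def Spec_incGuid_py (guid : String) (out : String) : Prop := out = incGuid_py_alt guid
instance (guid : String) (out : String) : Decidable (Spec_incGuid_py guid out) := by unfold Spec_incGuid_py; infer_instance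

-- ===== CLAIM (what is proved, stated in full; the proofs are below) =====
def Claim_equal_incGuid_py : Prop := ∀ (guid : String), Dom_incGuid_py guid → Pre_incGuid_py guid → Spec_incGuid_py guid (incGuid_py guid)

-- ===== LEMMAS AND PROOFS =====

-- core of B, on lists
def incGuidBList (l : List Char) : List Char :=
  let n := (l.takeWhile (fun c => c = '~')).length
  List.replicate n (pvTable.headD ' ')
    ++ pvTable.getD ((PySem.List.index? pvTable (l.getD n ' ')).getD 0 + 1) ' '
    :: l.drop (n + 1)

theorem table_index_tilde : (PySem.List.index? pvTable '~').getD 0 = 90 := by decide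

theorem table_no_overflow :
    pvTable.all (fun c => c = '~' || ¬ ((PySem.List.index? pvTable c).getD 0 + 1 = 91)) = true := by
  decide

theorem incGuidA_eq_B (l : List Char)
    (h : (l.dropWhile (fun c => c = '~')).headD ' ' ∈ pvTable) :
    incGuidA l = incGuidBList l := by
  induction l with
  | nil => simp at h; exact absurd h (by decide)
  | cons c rest ih =>
    by_cases hc : c = '~'
    · subst hc
      have hrest : (rest.dropWhile (fun c => c = '~')).headD ' ' ∈ pvTable := by
        simpa [List.dropWhile] using h
      have := ih hrest
      simp only [incGuidA, incGuidBList, table_index_tilde] at *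
      simp [List.takeWhile, List.replicate, this, pvTable]
    · -- first char is not '~'; Pre_ says it is in the table, so no overflow branch
      have hmem : c ∈ pvTable := by
        simpa [List.dropWhile, hc] using h
      have hno : ¬ ((PySem.List.index? pvTable c).getD 0 + 1 = 91) := by
        have := List.all_eq_true.mp table_no_overflow c hmem
        simpa [hc] using this
      have hlen : pvTable.length = 91 := by decide
      have hno' : ¬ ((PySem.List.index? pvTable c).getD 0 + 1 = pvTable.length) := by
        rw [hlen]; exact hno
      simp only [incGuidA, incGuidBList, if_neg hno']
      simp [List.takeWhile, hc]

-- ===== VERDICT (by name: the statement is the Claim_ definition above) =====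
theorem incGuid_py_spec : Claim_equal_incGuid_py := by
  intro guid _ hpre
  unfold Spec_incGuid_py incGuid_py incGuid_py_alt
  rw [incGuidA_eq_B guid.toList hpre]
  rfl
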